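-- pv_equiv track=rewrite | github.com/Vskesha/learning-modules | leetcode_solutions/logest_obstacle_course_1964.py | longest_obstacle_course
-- ===== SOURCE A (Python) =====
-- from bisect import bisect
--
-- def longest_obstacle_course(obstacles: list[int]):
--     ans, dis = [], []
--     for obstacle in obstacles:
--         if not dis or obstacle >= dis[-1]:
--             dis.append(obstacle)
--             ans.append(len(dis))
--         else:
--             idx = bisect(dis, obstacle)
--             dis[idx] = obstacle
--             ans.append(idx + 1)
--     return ans
-- ===== SOURCE B (Python) =====
-- def longest_obstacle_course(obstacles: list[int]):
--     ans = []
--     prev = []  # (height, longest course length ending there) for each processed obstacle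
--     for x in obstacles:
--         best = 0
--         for o, a in prev:
--             if o <= x and a > best:
--                 best = a
--         prev.append((x, best + 1))
--         ans.append(best + 1)
--     return ans
-- ===== Notes on version B (the rewrite author's own statement) =====
-- stated objective: simpler
-- what changed: replaces the patience-sorting tails array with binary search (bisect) by a direct quadratic DP that, for each obstacle, scans all previous obstacles for the best course it can extend
import Mathlib
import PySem

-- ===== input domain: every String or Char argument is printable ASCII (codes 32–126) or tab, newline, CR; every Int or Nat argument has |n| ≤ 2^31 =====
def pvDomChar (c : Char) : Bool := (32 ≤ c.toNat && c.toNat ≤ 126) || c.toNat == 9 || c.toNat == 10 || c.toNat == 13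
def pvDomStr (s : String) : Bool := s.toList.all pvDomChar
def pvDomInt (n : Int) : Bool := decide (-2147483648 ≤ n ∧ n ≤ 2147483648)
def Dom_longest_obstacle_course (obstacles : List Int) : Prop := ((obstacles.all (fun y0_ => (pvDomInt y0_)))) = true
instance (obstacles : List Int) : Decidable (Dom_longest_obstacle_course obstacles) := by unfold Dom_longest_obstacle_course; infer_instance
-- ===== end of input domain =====

-- B replaces A's patience-sorting tails array + binary search by a direct
-- quadratic DP scan of the previous obstacles (simpler, no bisect); same output.

-- ===== PORT A =====
-- bisect.bisect(dis, x): the algorithm keeps dis non-decreasing, and on a sorted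
-- list bisect_right returns the number of elements ≤ x (exact on every reachable state).
def pyBisect (dis : List Int) (x : Int) : Nat :=
  dis.countP (fun d => decide (d ≤ x))

-- one iteration of A's loop over state (ans, dis); the dependent if mirrors
-- Python's short-circuit `not dis or obstacle >= dis[-1]`
def stepA (s : List Int × List Int) (obstacle : Int) : List Int × List Int :=
  let ans := s.1
  let dis := s.2
  if h : dis = [] then
    (ans ++ [((dis.length : Int) + 1)], dis ++ [obstacle])
  else if obstacle ≥ dis.getLast h then
    (ans ++ [((dis.length : Int) + 1)], dis ++ [obstacle])
  else
    let idx := pyBisect dis obstacle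
    (ans ++ [((idx : Int) + 1)], dis.set idx obstacle)

def longest_obstacle_course (obstacles : List Int) : List Int :=
  (obstacles.foldl stepA ([], [])).1

-- ===== PORT B =====
-- inner scan of Source B: best course length among previous (height, length) pairs with height ≤ x
def bestPrev (prev : List (Int × Int)) (x : Int) : Int :=
  prev.foldl (fun best oa => if oa.1 ≤ x ∧ oa.2 > best then oa.2 else best) 0

-- one iteration of B's loop over state (ans, prev)
def stepB (s : List Int × List (Int × Int)) (x : Int) : List Int × List (Int × Int) :=
  let best := bestPrev s.2 x
  (s.1 ++ [best + 1], s.2 ++ [(x, best + 1)])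

def longest_obstacle_course_alt (obstacles : List Int) : List Int :=
  (obstacles.foldl stepB ([], [])).1

-- ===== PRECONDITION & SPEC =====
def Spec_longest_obstacle_course (obstacles : List Int) (out : List Int) : Prop := out = longest_obstacle_course_alt obstacles
instance (obstacles : List Int) (out : List Int) : Decidable (Spec_longest_obstacle_course obstacles out) := by unfold Spec_longest_obstacle_course; infer_instance

-- ===== CLAIM (what is proved, stated in full; the proofs are below) =====
def Claim_equal_longest_obstacle_course : Prop := ∀ (obstacles : List Int), Dom_longest_obstacle_course obstacles → Spec_longest_obstacle_course obstacles (longest_obstacle_course obstacles)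

-- ===== LEMMAS AND PROOFS =====

-- the coupling invariant: dis is sorted and, for every threshold y, the number of
-- tails ≤ y equals the best DP value among previous obstacles of height ≤ y
def InvAB (dis : List Int) (prev : List (Int × Int)) : Prop :=
  dis.Pairwise (· ≤ ·) ∧ ∀ y : Int, (pyBisect dis y : Int) = bestPrev prev y

lemma countLE_mono (l : List Int) {x y : Int} (h : x ≤ y) : pyBisect l x ≤ pyBisect l y := by
  unfold pyBisect
  apply List.countP_mono_left
  intro a _ ha
  simp at ha ⊢
  omega

lemma countLE_le_length (l : List Int) (x : Int) : pyBisect l x ≤ l.length :=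
  List.countP_le_length

lemma countLE_all {l : List Int} {x : Int} (h : ∀ a ∈ l, a ≤ x) : pyBisect l x = l.length := by
  unfold pyBisect
  rw [List.countP_eq_length]
  intro a ha
  simpa using h a ha

lemma countLE_char {l : List Int} (hs : l.Pairwise (· ≤ ·)) {i : Nat} (hi : i < l.length)
    (y : Int) : l[i] ≤ y ↔ i < pyBisect l y := by
  induction l generalizing i with
  | nil => simp at hi
  | cons d t ih =>
    rw [List.pairwise_cons] at hs
    have hcount : pyBisect (d :: t) y = (if d ≤ y then 1 else 0) + pyBisect t y := by
      simp [pyBisect, List.countP_cons]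
      split_ifs <;> omega
    cases i with
    | zero =>
      simp only [List.getElem_cons_zero, hcount]
      constructor
      · intro hd; split_ifs; omega
      · intro hpos
        by_contra hdy
        rw [if_neg hdy] at hpos
        simp only [Nat.zero_add] at hpos
        have hp : 0 < t.countP (fun d => decide (d ≤ y)) := by simpa [pyBisect] using hpos
        obtain ⟨a, ha, hay⟩ := List.countP_pos_iff.mp hp
        exact hdy (le_trans (hs.1 a ha) (by simpa using hay))
    | succ i =>
      simp only [List.length_cons, Nat.succ_lt_succ_iff] at hi
      have iht := ih hs.2 hi
      simp only [List.getElem_cons_succ, hcount]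
      by_cases hd : d ≤ y
      · rw [if_pos hd]; omega
      · rw [if_neg hd]
        constructor
        · intro hty
          exact absurd (le_trans (hs.1 _ (List.getElem_mem hi)) hty) hd
        · intro h'
          exact iht.mpr (by omega)

lemma countLE_set {l : List Int} {c : Nat} (hc : c < l.length) (x y : Int) :
    pyBisect (l.set c x) y + (if l[c] ≤ y then 1 else 0)
      = pyBisect l y + (if x ≤ y then 1 else 0) := by
  induction l generalizing c with
  | nil => simp at hc
  | cons d t ih =>
    cases c with
    | zero =>
      simp [pyBisect, List.countP_cons]
      split_ifs <;> omega
    | succ c =>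
      simp only [List.length_cons, Nat.succ_lt_succ_iff] at hc
      have := ih hc
      simp only [List.set_cons_succ, List.getElem_cons_succ]
      simp only [pyBisect, List.countP_cons] at this ⊢
      split_ifs at this ⊢ <;> omega

lemma le_getLast {l : List Int} (hs : l.Pairwise (· ≤ ·)) (h : l ≠ []) :
    ∀ a ∈ l, a ≤ l.getLast h := by
  intro a ha
  obtain ⟨i, hi, rfl⟩ := List.mem_iff_getElem.mp ha
  rw [List.getLast_eq_getElem h]
  rcases Nat.lt_or_ge i (l.length - 1) with hlt | hge
  · exact List.pairwise_iff_getElem.mp hs i (l.length - 1) hi (by omega) hlt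
  · have : i = l.length - 1 := by omega
    subst this; exact le_refl _

lemma bestPrev_append (prev : List (Int × Int)) (o a y : Int) :
    bestPrev (prev ++ [(o, a)]) y
      = if o ≤ y ∧ a > bestPrev prev y then a else bestPrev prev y := by
  simp [bestPrev, List.foldl_append]

-- shared append case: if every processed tail is ≤ x, both sides extend by length+1
lemma invAB_append {dis : List Int} {prev : List (Int × Int)} (hsort : dis.Pairwise (· ≤ ·))
    (hinv : ∀ y : Int, (pyBisect dis y : Int) = bestPrev prev y) {x : Int}
    (hall : ∀ a ∈ dis, a ≤ x) :
    InvAB (dis ++ [x]) (prev ++ [(x, (dis.length : Int) + 1)]) := by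
  constructor
  · rw [List.pairwise_append]
    exact ⟨hsort, List.pairwise_singleton _ _, fun a ha b hb => by
      simp at hb; subst hb; exact hall a ha⟩
  · intro y
    have happ : pyBisect (dis ++ [x]) y
        = pyBisect dis y + (if x ≤ y then 1 else 0) := by
      simp [pyBisect, List.countP_append, List.countP_cons]
    rw [happ, bestPrev_append, ← hinv y]
    by_cases hxy : x ≤ y
    · have hfull : pyBisect dis y = dis.length :=
        countLE_all (fun a ha => le_trans (hall a ha) hxy)
      rw [if_pos hxy, if_pos ⟨hxy, by rw [hfull]; omega⟩, hfull]
      push_cast; omega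
    · rw [if_neg hxy, if_neg (fun hcon => hxy hcon.1)]
      push_cast; omega

-- one step of A equals one step of B and re-establishes the invariant
lemma step_main {dis : List Int} {prev : List (Int × Int)} (h : InvAB dis prev)
    (ans : List Int) (x : Int) :
    stepA (ans, dis) x = (ans ++ [bestPrev prev x + 1], (stepA (ans, dis) x).2)
      ∧ InvAB (stepA (ans, dis) x).2 (prev ++ [(x, bestPrev prev x + 1)]) := by
  obtain ⟨hsort, hinv⟩ := h
  have hx := hinv x
  by_cases hemp : dis = []
  · subst hemp
    have hstep : stepA (ans, ([] : List Int)) x = (ans ++ [(0 : Int) + 1], [x]) := by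
      simp [stepA]
    have hb : bestPrev prev x = 0 := by simpa [pyBisect] using hx.symm
    refine ⟨by rw [hstep, hb], ?_⟩
    rw [hstep, hb]
    have := invAB_append (List.Pairwise.nil) hinv (x := x) (by simp)
    simpa using this
  · by_cases hge : x ≥ dis.getLast hemp
    · -- append branch: every element of dis is ≤ x
      have hall : ∀ a ∈ dis, a ≤ x := fun a ha => le_trans (le_getLast hsort hemp a ha) hge
      have hcx : pyBisect dis x = dis.length := countLE_all hall
      have hstep : stepA (ans, dis) x
          = (ans ++ [((dis.length : Int) + 1)], dis ++ [x]) := by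
        simp [stepA, hemp, hge]
      have hbx : bestPrev prev x = (dis.length : Int) := by rw [← hx, hcx]
      refine ⟨by rw [hstep, hbx], ?_⟩
      rw [hstep, hbx]
      exact invAB_append hsort hinv hall
    · -- replace branch
      have hlt : dis.getLast hemp > x := by omega
      have hlen : 0 < dis.length := List.length_pos_iff.mpr hemp
      have hlast : dis.getLast hemp = dis[dis.length - 1] := List.getLast_eq_getElem hemp
      set c := pyBisect dis x with hc
      have hclt : c < dis.length := by
        have h1 : ¬ (dis.length - 1 < c) := by
          intro hcon
          have := (countLE_char hsort (i := dis.length - 1) (by omega) x).mpr hcon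
          rw [← hlast] at this; omega
        have := countLE_le_length dis x
        omega
      have hdc : ¬ dis[c] ≤ x := by
        intro hcon
        have := (countLE_char hsort hclt x).mp hcon
        omega
      have hstep : stepA (ans, dis) x
          = (ans ++ [((c : Int) + 1)], dis.set c x) := by
        simp only [stepA, dif_neg hemp]
        rw [if_neg (by omega)]
      have hbx : bestPrev prev x = (c : Int) := hx.symm
      refine ⟨by rw [hstep, hbx], ?_⟩
      rw [hstep, hbx]
      show InvAB (dis.set c x) (prev ++ [(x, (c : Int) + 1)])
      constructor
      · -- sortedness of dis.set c x
        rw [List.pairwise_iff_getElem]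
        intro i j hi hj hij
        simp only [List.length_set] at hi hj
        simp only [List.getElem_set]
        split_ifs with h1 h2 h2
        · omega
        · -- i = c < j : x ≤ dis[j]
          have : ¬ dis[j] ≤ x := by
            intro hcon
            have := (countLE_char hsort hj x).mp hcon
            omega
          omega
        · -- i < j = c : dis[i] ≤ x
          exact (countLE_char hsort hi x).mpr (by omega)
        · exact List.pairwise_iff_getElem.mp hsort i j hi hj hij
      · intro y
        rw [bestPrev_append, ← hinv y]
        have hset := countLE_set hclt x y
        have hcy := countLE_le_length dis y
        have hchar := countLE_char hsort hclt y
        by_cases hdcy : dis[c] ≤ y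
        · have hxy : x ≤ y := le_trans (by omega) hdcy
          have hclty := hchar.mp hdcy
          rw [if_pos hdcy, if_pos hxy] at hset
          rw [if_neg (by omega)]
          omega
        · have hyc : pyBisect dis y ≤ c := by
            by_contra hcon
            exact hdcy (hchar.mpr (by omega))
          rw [if_neg hdcy] at hset
          by_cases hxy : x ≤ y
          · have hmx : pyBisect dis x ≤ pyBisect dis y := countLE_mono dis hxy
            rw [if_pos hxy] at hset
            rw [if_pos ⟨hxy, by omega⟩]
            omega
          · rw [if_neg hxy] at hset
            rw [if_neg (fun hcon => hxy hcon.1)]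
            omega

lemma main_loop (obstacles : List Int) :
    ∀ (ans : List Int) (dis : List Int) (prev : List (Int × Int)), InvAB dis prev →
      (obstacles.foldl stepA (ans, dis)).1 = (obstacles.foldl stepB (ans, prev)).1 := by
  induction obstacles with
  | nil => intro ans dis prev _; rfl
  | cons x rest ih =>
    intro ans dis prev hinv
    obtain ⟨heq, hinv'⟩ := step_main hinv ans x
    have hB : stepB (ans, prev) x
        = (ans ++ [bestPrev prev x + 1], prev ++ [(x, bestPrev prev x + 1)]) := rfl
    simp only [List.foldl_cons, hB]
    rw [show List.foldl stepA (stepA (ans, dis) x) rest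
        = List.foldl stepA (ans ++ [bestPrev prev x + 1], (stepA (ans, dis) x).2) rest from by
      rw [← heq]]
    exact ih _ _ _ hinv'

-- ===== VERDICT (by name: the statement is the Claim_ definition above) =====
theorem longest_obstacle_course_spec : Claim_equal_longest_obstacle_course := by
  intro obstacles _
  unfold Spec_longest_obstacle_course longest_obstacle_course longest_obstacle_course_alt
  exact main_loop obstacles [] [] [] ⟨List.Pairwise.nil, fun y => by simp [pyBisect, bestPrev]⟩
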